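-- pv_equiv track=rewrite | github.com/OwczarekP/AdventOfCode | day4.py | third_check_p2
-- ===== SOURCE A (Python) =====
-- def third_check_p2(password_list):
--     possibilities_3 = []
--     for password in password_list:
--         number = str(password)
--         for digit in number:
--             count_nb = number.count(digit)
--             if count_nb == 2:
--                 possibilities_3.append(password)
--                 break
--     return possibilities_3
-- ===== SOURCE B (Python) =====
-- def has_run_of_two(digits):
--     # digits is sorted, so equal characters form one contiguous run;
--     # scan run by run and succeed on a run of length exactly 2
--     while digits:
--         c = digits[0]
--         run = 0
--         while run < len(digits) and digits[run] == c:
--             run += 1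
--         if run == 2:
--             return True
--         digits = digits[run:]
--     return False
--
-- def third_check_p2(password_list):
--     result = []
--     for p in password_list:
--         if has_run_of_two(sorted(str(p))):
--             result.append(p)
--     return result
-- ===== Notes on version B (the rewrite author's own statement) =====
-- stated objective: alternative
-- what changed: Instead of rescanning the digit string per digit with str.count and an early break, B sorts each password's digits so equal digits become one contiguous run, then scans the run lengths once and selects the password if some run has length exactly 2 (sort-then-scan).
import Mathlib
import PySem

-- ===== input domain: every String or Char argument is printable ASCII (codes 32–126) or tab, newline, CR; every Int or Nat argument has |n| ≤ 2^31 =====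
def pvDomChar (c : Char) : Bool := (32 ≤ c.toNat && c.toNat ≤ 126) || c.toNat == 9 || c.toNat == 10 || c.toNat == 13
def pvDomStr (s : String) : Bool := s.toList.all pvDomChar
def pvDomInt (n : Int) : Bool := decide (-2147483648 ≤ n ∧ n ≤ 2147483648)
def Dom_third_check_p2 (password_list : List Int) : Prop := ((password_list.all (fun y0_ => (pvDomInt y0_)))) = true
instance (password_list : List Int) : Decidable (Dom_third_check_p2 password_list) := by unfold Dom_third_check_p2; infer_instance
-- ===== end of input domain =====

-- B replaces A's per-digit rescan (str.count inside a loop with break) by sorting each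
-- password's digits and scanning the contiguous runs once for a run of length exactly 2 (alternative algorithm).


-- ===== PORT A =====
-- inner loop: 'for digit in number: if number.count(digit) == 2: append; break'
def pvScanA (full : List Char) : List Char → Bool
  | [] => false
  | digit :: rest => if full.count digit == 2 then true else pvScanA full rest

def third_check_p2 (password_list : List Int) : List Int :=
  password_list.foldl
    (fun possibilities_3 password =>
      if pvScanA (PySem.Int.toChars password) (PySem.Int.toChars password) then
        possibilities_3 ++ [password]
      else possibilities_3) []

-- ===== PORT B =====
-- has_run_of_two: outer while consumes one run per iteration; the inner counting
-- while-loop is the length of the equal prefix (takeWhile), digits[run:] is dropWhile.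
def pvHasRunOfTwo : List Char → Bool
  | [] => false
  | c :: rest =>
    let run := (rest.takeWhile (fun x => x == c)).length + 1
    if run == 2 then true
    else pvHasRunOfTwo (rest.dropWhile (fun x => x == c))
termination_by l => l.length
decreasing_by
  simpa using Nat.lt_succ_of_le (List.length_dropWhile_le _ _)

def third_check_p2_alt (password_list : List Int) : List Int :=
  password_list.foldl
    (fun result p =>
      if pvHasRunOfTwo (PySem.List.sorted (PySem.Int.toChars p) (fun c => c) false) then
        result ++ [p]
      else result) []

-- ===== PRECONDITION & SPEC =====
def Spec_third_check_p2 (password_list : List Int) (out : List Int) : Prop := out = third_check_p2_alt password_list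
instance (password_list : List Int) (out : List Int) : Decidable (Spec_third_check_p2 password_list out) := by unfold Spec_third_check_p2; infer_instance

-- ===== CLAIM (what is proved, stated in full; the proofs are below) =====
def Claim_equal_third_check_p2 : Prop := ∀ (password_list : List Int), Dom_third_check_p2 password_list → Spec_third_check_p2 password_list (third_check_p2 password_list)

-- ===== LEMMAS AND PROOFS =====
lemma pvScanA_iff (full : List Char) (l : List Char) :
    pvScanA full l = true ↔ ∃ d ∈ l, full.count d = 2 := by
  induction l with
  | nil => simp [pvScanA]
  | cons d rest ih =>
    by_cases h : full.count d = 2 <;> simp [pvScanA, h, ih]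

-- On a ≤-sorted list, the run scan finds a run of length 2 iff some element has count 2.
lemma pvHasRunOfTwo_iff (l : List Char) (hs : l.Pairwise (· ≤ ·)) :
    pvHasRunOfTwo l = true ↔ ∃ d ∈ l, l.count d = 2 := by
  induction hn : l.length using Nat.strong_induction_on generalizing l with
  | _ n ih =>
  match l, hs with
  | [], _ => simp [pvHasRunOfTwo]
  | c :: rest, hs =>
    have hle : ∀ x ∈ rest, c ≤ x := fun x hx => (List.pairwise_cons.mp hs).1 x hx
    have hsr : rest.Pairwise (· ≤ ·) := (List.pairwise_cons.mp hs).2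
    set t := rest.takeWhile (fun x => x == c) with ht
    set r := rest.dropWhile (fun x => x == c) with hr
    have hsplit : rest = t ++ r := (List.takeWhile_append_dropWhile).symm
    have htc : ∀ x ∈ t, x = c := fun x hx => by
      have := List.mem_takeWhile_imp hx; simpa using this
    have hrc : ∀ x ∈ r, x ≠ c := by
      intro x hx
      rcases hrh : r with _ | ⟨h0, rtl⟩
      · simp [hrh] at hx
      · have hh0 : ¬ (h0 == c) = true := by
          have := List.head?_dropWhile_not (fun x => x == c) rest
          rw [← hr, hrh] at this; simpa using this
        have hh0c : h0 ≠ c := by simpa using hh0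
        have hh0le : c ≤ h0 := hle h0 (by rw [hsplit, hrh]; simp)
        have hlt : c < h0 := lt_of_le_of_ne hh0le (Ne.symm hh0c)
        have hsr2 : r.Pairwise (· ≤ ·) := hsr.sublist (List.dropWhile_sublist _)
        rw [hrh] at hx hsr2
        rcases List.mem_cons.mp hx with hx1 | hx1
        · exact hx1 ▸ hh0c
        · have : h0 ≤ x := (List.pairwise_cons.mp hsr2).1 x hx1
          exact fun hxc => absurd (hxc ▸ this) (not_le.mpr hlt)
    have hcount_c : (c :: rest).count c = t.length + 1 := by
      have h1 : t.count c = t.length := List.count_eq_length.mpr (fun x hx => by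
        have := htc x hx; simp [this])
      have h2 : r.count c = 0 := List.count_eq_zero.mpr (fun hx => (hrc c hx) rfl)
      rw [List.count_cons_self, hsplit, List.count_append, h1, h2]
    have hcount_ne : ∀ d, d ≠ c → (c :: rest).count d = r.count d := by
      intro d hd
      have h1 : t.count d = 0 := List.count_eq_zero.mpr (fun hx => hd (htc d hx))
      rw [hsplit]
      simp [List.count_append, h1, Ne.symm hd]
    have hunf : pvHasRunOfTwo (c :: rest)
        = if t.length + 1 == 2 then true else pvHasRunOfTwo r := by
      rw [pvHasRunOfTwo]
    by_cases h2 : t.length = 1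
    · rw [hunf]
      simp only [h2]
      constructor
      · intro _; exact ⟨c, by simp, by rw [hcount_c, h2]⟩
      · intro _; rfl
    · have hlr : r.length < n := by
        rw [← hn]
        exact Nat.lt_succ_of_le (List.length_dropWhile_le _ _)
      have ihr := ih r.length hlr r (hsr.sublist (List.dropWhile_sublist _)) rfl
      have hcond : ¬ ((t.length + 1 == 2) = true) := by simpa using fun h => h2 (by omega)
      rw [hunf, if_neg hcond, ihr]
      constructor
      · rintro ⟨d, hd, hcd⟩
        have hdc : d ≠ c := hrc d hd
        refine ⟨d, ?_, ?_⟩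
        · rw [hsplit]; simp [hd]
        · rw [hcount_ne d hdc]; exact hcd
      · rintro ⟨d, hd, hcd⟩
        have hdc : d ≠ c := by
          intro hdce; rw [hdce, hcount_c] at hcd; omega
        have hdr : d ∈ r := by
          rcases List.mem_cons.mp hd with h | h
          · exact absurd h hdc
          · rw [hsplit] at h
            rcases List.mem_append.mp h with h | h
            · exact absurd (htc d h) hdc
            · exact h
        exact ⟨d, hdr, by rw [← hcount_ne d hdc]; exact hcd⟩

-- ===== VERDICT (by name: the statement is the Claim_ definition above) =====
theorem third_check_p2_spec : Claim_equal_third_check_p2 := by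
  intro password_list _
  unfold Spec_third_check_p2 third_check_p2 third_check_p2_alt
  rw [PySem.List.foldl_append_if_eq_filter, PySem.List.foldl_append_if_eq_filter]
  refine List.filter_congr (fun p _ => ?_)
  rw [Bool.eq_iff_iff, pvScanA_iff, pvHasRunOfTwo_iff _ ?hs]
  case hs =>
    have := PySem.List.sorted_pairwise (xs := PySem.Int.toChars p) (key := fun c => c) 
    simpa using this
  constructor
  · rintro ⟨d, hd, hc⟩
    refine ⟨d, ?_, ?_⟩
    · exact (PySem.List.mem_sorted _ _ _ _).mpr hd
    · rw [(PySem.List.sorted_perm (PySem.Int.toChars p) (fun c => c) false).count_eq]; exact hc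
  · rintro ⟨d, hd, hc⟩
    refine ⟨d, (PySem.List.mem_sorted _ _ _ _).mp hd, ?_⟩
    rw [← (PySem.List.sorted_perm (PySem.Int.toChars p) (fun c => c) false).count_eq]; exact hc
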